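-- pv_equiv track=rewrite | github.com/wisoniamir/Genesis-FINAL-TRY | DUPLICATE_QUARANTINE/string.py | _binify
-- ===== SOURCE A (Python) =====
-- def _binify(cols: list[int], line_width: int) -> list[int]:
--     adjoin_width = 1
--     bins = []
--     curr_width = 0
--     i_last_column = len(cols) - 1
--     for i, w in enumerate(cols):
--         w_adjoined = w + adjoin_width
--         curr_width += w_adjoined
--         if i_last_column == i:
--             wrap = curr_width + 1 > line_width and i > 0
--         else:
--             wrap = curr_width + 2 > line_width and i > 0
--         if wrap:
--             bins.append(i)
--             curr_width = w_adjoined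
--
--     bins.append(len(cols))
--     return bins
-- ===== SOURCE B (Python) =====
-- def _binify(cols: list[int], line_width: int) -> list[int]:
--     n = len(cols)
--     # prefix sums of adjoined widths: pre[j] = sum of (w + 1) over cols[:j]
--     pre = [0] * (n + 1)
--     for i, w in enumerate(cols):
--         pre[i + 1] = pre[i] + w + 1
--     # next-break table: nxt[i] = index where a bin starting at column i must end
--     # (n if the bin can reach the end of the line)
--     nxt = [n] * n
--     for i in range(n):
--         for j in range(i + 1, n):
--             extra = 1 if j == n - 1 else 2
--             if pre[j + 1] - pre[i] + extra > line_width: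
--                 nxt[i] = j
--                 break
--     bins = []
--     i = 0
--     while i < n and nxt[i] < n:
--         bins.append(nxt[i])
--         i = nxt[i]
--     bins.append(n)
--     return bins
-- ===== Notes on version B (the rewrite author's own statement) =====
-- stated objective: alternative
-- what changed: B replaces A's single pass with a mutable running width by staged passes over different data: it precomputes a prefix-sum array of adjoined widths, builds a next-break table for every possible bin start, then pointer-chases through that table to emit the boundaries.
import Mathlib
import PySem

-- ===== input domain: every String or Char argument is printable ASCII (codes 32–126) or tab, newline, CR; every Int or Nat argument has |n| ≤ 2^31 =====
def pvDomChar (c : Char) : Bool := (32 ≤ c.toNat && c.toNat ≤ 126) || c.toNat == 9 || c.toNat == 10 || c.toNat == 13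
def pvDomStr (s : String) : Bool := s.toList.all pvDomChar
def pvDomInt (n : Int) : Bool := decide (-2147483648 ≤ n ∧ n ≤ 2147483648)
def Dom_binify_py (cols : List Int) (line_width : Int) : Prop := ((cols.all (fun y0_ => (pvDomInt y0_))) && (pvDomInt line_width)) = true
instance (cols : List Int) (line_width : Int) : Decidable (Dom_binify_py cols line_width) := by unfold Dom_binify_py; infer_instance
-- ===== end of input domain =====

-- B replaces A's single pass with a mutable running width by staged passes: a prefix-sum
-- array, a next-break table for every start index, and a pointer chase (objective: alternative).


-- ===== PORT A =====
-- A's `for i, w in enumerate(cols)` as structural recursion over the list carrying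
-- the index i and the loop state (bins, curr_width).
def binAgo (lw iLast : Int) : List Int → Nat → List Int → Int → List Int
  | [], _, bins, _ => bins
  | w :: rest, i, bins, curr =>
      let wAdj := w + 1
      let curr' := curr + wAdj
      let wrap : Bool :=
        if iLast = (i : Int) then decide (curr' + 1 > lw) && decide ((i : Int) > 0)
        else decide (curr' + 2 > lw) && decide ((i : Int) > 0)
      if wrap then binAgo lw iLast rest (i + 1) (bins ++ [(i : Int)]) wAdj
      else binAgo lw iLast rest (i + 1) bins curr'

def binify_py (cols : List Int) (line_width : Int) : List Int :=
  binAgo line_width ((cols.length : Int) - 1) cols 0 [] 0 ++ [(cols.length : Int)]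

-- ===== PORT B =====
-- B's prefix-sum array pre: pre[j] = sum of (w + 1) over cols[:j], built left to right.
def binPyScan : Int → List Int → List Int
  | acc, [] => [acc]
  | acc, w :: rest => acc :: binPyScan (acc + w + 1) rest

-- B's inner `for j in range(i+1, n): … break`: first break index for a bin starting at i
-- (n if none). `fuel` is only a totality guard; fuel = n suffices since j grows to n.
-- (pre.getD is Python's pre[...]: exact here since the j < n guard keeps indices in range.)
def binNxtScan (pre : List Int) (lw : Int) (n i : Nat) : Nat → Nat → Nat
  | 0, _ => n
  | fuel + 1, j =>
      if j < n then
        if pre.getD (j + 1) 0 - pre.getD i 0 + (if j = n - 1 then (1 : Int) else 2) > lw then j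
        else binNxtScan pre lw n i fuel (j + 1)
      else n

-- B's next-break table, one entry per start index.
def binNxtTable (cols : List Int) (lw : Int) : List Nat :=
  (List.range cols.length).map
    (fun i => binNxtScan (binPyScan 0 cols) lw cols.length i cols.length (i + 1))

-- B's `while i < n and nxt[i] < n` pointer chase (same fuel guard: i strictly grows).
def binChase (nxt : List Nat) (n : Nat) : Nat → Nat → List Int → List Int
  | 0, _, bins => bins
  | fuel + 1, i, bins =>
      if i < n then
        let k := nxt.getD i n
        if k < n then binChase nxt n fuel k (bins ++ [(k : Int)])
        else bins
      else bins

def binify_py_alt (cols : List Int) (line_width : Int) : List Int :=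
  binChase (binNxtTable cols line_width) cols.length cols.length 0 [] ++ [(cols.length : Int)]

-- ===== PRECONDITION & SPEC =====
def Spec_binify_py (cols : List Int) (line_width : Int) (out : List Int) : Prop := out = binify_py_alt cols line_width
instance (cols : List Int) (line_width : Int) (out : List Int) : Decidable (Spec_binify_py cols line_width out) := by unfold Spec_binify_py; infer_instance

-- ===== CLAIM (what is proved, stated in full; the proofs are below) =====
def Claim_equal_binify_py : Prop := ∀ (cols : List Int) (line_width : Int), Dom_binify_py cols line_width → Spec_binify_py cols line_width (binify_py cols line_width)

-- ===== LEMMAS AND PROOFS =====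

-- Mathematical prefix sums of adjoined widths.
def binPsum (cols : List Int) (j : Nat) : Int := ((cols.take j).map (fun w => w + 1)).sum

theorem binPsum_succ (cols : List Int) (j : Nat) (h : j < cols.length) :
    binPsum cols (j + 1) = binPsum cols j + (cols[j] + 1) := by
  have ht : List.take (j + 1) cols = List.take j cols ++ [cols[j]] := by
    rw [List.take_add_one, List.getElem?_eq_getElem h]
    simp
  unfold binPsum
  rw [ht, List.map_append, List.sum_append]
  simp

theorem binPyScan_getD (cols : List Int) :
    ∀ (a : Int) (j : Nat), j ≤ cols.length → (binPyScan a cols).getD j 0 = a + binPsum cols j := by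
  induction cols with
  | nil =>
    intro a j hj
    have hj0 : j = 0 := by simpa using hj
    subst hj0
    simp [binPyScan, binPsum]
  | cons w rest ih =>
    intro a j hj
    cases j with
    | zero => simp [binPyScan, binPsum]
    | succ j =>
      have := ih (a + w + 1) j (by simpa using hj)
      simp only [binPyScan, List.getD_cons_succ, this, binPsum, List.take_succ_cons,
        List.map_cons, List.sum_cons]
      ring

theorem binNxtScan_ge (pre : List Int) (lw : Int) (n i : Nat) :
    ∀ fuel j, j ≤ binNxtScan pre lw n i fuel j ∨ binNxtScan pre lw n i fuel j = n := by
  intro fuel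
  induction fuel with
  | zero => intro j; right; rfl
  | succ fuel ih =>
    intro j
    simp only [binNxtScan]
    by_cases h : j < n
    · rw [if_pos h]
      by_cases hc : pre.getD (j + 1) 0 - pre.getD i 0 + (if j = n - 1 then (1 : Int) else 2) > lw
      · rw [if_pos hc]; left; exact le_rfl
      · rw [if_neg hc]
        rcases ih (j + 1) with h' | h'
        · left; omega
        · right; exact h'
    · rw [if_neg h]; right; rfl

-- The table entry for a start s < n is the inner scan from s + 1.
theorem binNxtTable_getD (cols : List Int) (lw : Int) (s : Nat) (hs : s < cols.length) :
    (binNxtTable cols lw).getD s cols.length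
      = binNxtScan (binPyScan 0 cols) lw cols.length s cols.length (s + 1) := by
  rw [binNxtTable, List.getD_eq_getElem _ _ (by simpa using hs)]
  simp

-- Bridge: within one bin started at s, A's pass from position j (accumulated width
-- Psum j - Psum s) runs exactly to the inner scan's break index k, wraps there
-- (if k < n) and restarts with width cols[k] + 1.
theorem bin_bridge (cols : List Int) (lw : Int) (s : Nat) (hs : s < cols.length) :
    ∀ fuel j bins, 1 ≤ j → cols.length ≤ fuel + j →
      binAgo lw ((cols.length : Int) - 1) (cols.drop j) j bins (binPsum cols j - binPsum cols s) =
        (if binNxtScan (binPyScan 0 cols) lw cols.length s fuel j < cols.length then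
           binAgo lw ((cols.length : Int) - 1)
             (cols.drop (binNxtScan (binPyScan 0 cols) lw cols.length s fuel j + 1))
             (binNxtScan (binPyScan 0 cols) lw cols.length s fuel j + 1)
             (bins ++ [(binNxtScan (binPyScan 0 cols) lw cols.length s fuel j : Int)])
             (cols.getD (binNxtScan (binPyScan 0 cols) lw cols.length s fuel j) 0 + 1)
         else bins) := by
  intro fuel
  induction fuel with
  | zero =>
    intro j bins hj hfuel
    rw [List.drop_eq_nil_of_le (by omega)]
    simp only [binAgo, binNxtScan]
    rw [if_neg (by omega)]
  | succ fuel ih =>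
    intro j bins hj hfuel
    by_cases h : j < cols.length
    · rw [List.drop_eq_getElem_cons h]
      have hg : cols.getD j 0 = cols[j] := List.getD_eq_getElem cols 0 h
      have hpj : (binPyScan 0 cols).getD (j + 1) 0 = binPsum cols (j + 1) := by
        simpa using binPyScan_getD cols 0 (j + 1) (by omega)
      have hps : (binPyScan 0 cols).getD s 0 = binPsum cols s := by
        simpa using binPyScan_getD cols 0 s (by omega)
      have hstep := binPsum_succ cols j h
      simp only [binAgo, binNxtScan, if_pos h, hpj, hps]
      by_cases hw : binPsum cols (j + 1) - binPsum cols s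
          + (if j = cols.length - 1 then (1 : Int) else 2) > lw
      · rw [if_pos hw, if_pos h, hg]
        by_cases hc1 : j = cols.length - 1
        · rw [if_pos hc1] at hw
          rw [if_pos (show (cols.length : Int) - 1 = (j : Int) by omega),
              if_pos (show (decide (binPsum cols j - binPsum cols s + (cols[j] + 1) + 1 > lw)
                  && decide ((j : Int) > 0)) = true by
                simp only [Bool.and_eq_true, decide_eq_true_eq]; exact ⟨by omega, by omega⟩)]
        · rw [if_neg hc1] at hw
          rw [if_neg (show ¬ ((cols.length : Int) - 1 = (j : Int)) by omega),
              if_pos (show (decide (binPsum cols j - binPsum cols s + (cols[j] + 1) + 2 > lw)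
                  && decide ((j : Int) > 0)) = true by
                simp only [Bool.and_eq_true, decide_eq_true_eq]; exact ⟨by omega, by omega⟩)]
      · rw [if_neg hw]
        have ih' := ih (j + 1) bins (by omega) (by omega)
        have harith : binPsum cols j - binPsum cols s + (cols[j] + 1)
            = binPsum cols (j + 1) - binPsum cols s := by omega
        by_cases hc1 : j = cols.length - 1
        · rw [if_pos hc1] at hw
          rw [if_pos (show (cols.length : Int) - 1 = (j : Int) by omega),
              if_neg (show ¬ ((decide (binPsum cols j - binPsum cols s + (cols[j] + 1) + 1 > lw)
                  && decide ((j : Int) > 0)) = true) by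
                simp only [Bool.and_eq_true, decide_eq_true_eq, not_and]; intro hcontra; omega)]
          rw [harith]; exact ih'
        · rw [if_neg hc1] at hw
          rw [if_neg (show ¬ ((cols.length : Int) - 1 = (j : Int)) by omega),
              if_neg (show ¬ ((decide (binPsum cols j - binPsum cols s + (cols[j] + 1) + 2 > lw)
                  && decide ((j : Int) > 0)) = true) by
                simp only [Bool.and_eq_true, decide_eq_true_eq, not_and]; intro hcontra; omega)]
          rw [harith]; exact ih'
    · rw [List.drop_eq_nil_of_le (by omega)]
      simp only [binAgo, binNxtScan]
      rw [if_neg h, if_neg (by omega)]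

-- Outer bridge: from any bin start s < n, A's remaining pass equals B's pointer chase.
theorem bin_outer (cols : List Int) (lw : Int) :
    ∀ f s bins, s < cols.length → cols.length ≤ f + s →
      binAgo lw ((cols.length : Int) - 1) (cols.drop (s + 1)) (s + 1) bins
          (binPsum cols (s + 1) - binPsum cols s) =
        binChase (binNxtTable cols lw) cols.length f s bins := by
  intro f
  induction f with
  | zero => intro s bins hs hf; omega
  | succ f ih =>
    intro s bins hs hf
    rw [bin_bridge cols lw s hs cols.length (s + 1) bins (by omega) (by omega)]
    conv_rhs => rw [binChase]
    rw [if_pos hs, binNxtTable_getD cols lw s hs]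
    set k := binNxtScan (binPyScan 0 cols) lw cols.length s cols.length (s + 1) with hk
    by_cases hkn : k < cols.length
    · rw [if_pos hkn, if_pos hkn]
      have hkge : s + 1 ≤ k := by
        rcases binNxtScan_ge (binPyScan 0 cols) lw cols.length s cols.length (s + 1) with h' | h'
        · exact h'
        · omega
      have hwidth : cols.getD k 0 + 1 = binPsum cols (k + 1) - binPsum cols k := by
        rw [List.getD_eq_getElem cols 0 hkn, binPsum_succ cols k hkn]; ring
      rw [hwidth]
      exact ih k (bins ++ [(k : Int)]) hkn (by omega)
    · rw [if_neg hkn, if_neg hkn]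

-- ===== VERDICT (by name: the statement is the Claim_ definition above) =====
theorem binify_py_spec : Claim_equal_binify_py := by
  intro cols lw _
  unfold Spec_binify_py binify_py binify_py_alt
  cases cols with
  | nil => simp [binAgo, binChase]
  | cons c rest =>
    congr 1
    have h1 : binAgo lw (((c :: rest).length : Int) - 1) (c :: rest) 0 [] 0
        = binAgo lw (((c :: rest).length : Int) - 1) ((c :: rest).drop 1) 1 []
            (binPsum (c :: rest) 1 - binPsum (c :: rest) 0) := by
      simp only [binAgo]
      rw [if_neg (by split_ifs <;> simp)]
      simp [binPsum]
    rw [h1, bin_outer (c :: rest) lw (c :: rest).length 0 [] (by simp) (by omega)]
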